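-- pv_equiv track=rewrite | github.com/R4yya/SBER-tasks | python/main.py | add_atms
-- ===== SOURCE A (Python) =====
-- from typing import List
--
-- def add_atms(n: int, k: int, distances: List[int]) -> List[int]:
--     # Создаем список новых расстояний
--     new_distances = []
--
--     # Добавляем сначала существующие расстояния
--     for distance in distances:
--         new_distances.append(distance)
--
--     # Добавляем новые банкоматы между существующими
--     for i in range(k):
--         # Берем самое большое расстояние
--         max_distance = max(new_distances)
--         # Индекс самого большого расстояния
--         max_distance_index = new_distances.index(max_distance)
--         # Новое расстояние будет половиной максимального
--         new_distance = max_distance // 2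
--         # Вставляем новое расстояние перед максимальным
--         new_distances.insert(max_distance_index, new_distance)
--         # Вставляем еще одно новое расстояние
--         new_distances.insert(max_distance_index + 1, new_distance)
--         # Удаляем старое максимальное расстояние
--         new_distances.remove(max_distance)
--
--     return new_distances
-- ===== SOURCE B (Python) =====
-- from bisect import insort
-- from typing import List
--
-- def add_atms(n: int, k: int, distances: List[int]) -> List[int]:
--     # Priority queue kept as a sorted list of (-distance, position) pairs, so the
--     # front is always the largest distance (leftmost first).  Position keys are
--     # tuples: splitting at position p puts the two halves at p+(0,) and p+(1,),
--     # which keeps left-to-right order without shifting anything else.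
--     pq = []
--     for i, d in enumerate(distances):
--         insort(pq, (-d, (i,)))
--     for _ in range(k):
--         neg, pos = pq.pop(0)
--         half = (-neg) // 2
--         insort(pq, (-half, pos + (0,)))
--         insort(pq, (-half, pos + (1,)))
--     return [-neg for neg, pos in sorted(pq, key=lambda e: e[1])]
-- ===== Notes on version B (the rewrite author's own statement) =====
-- stated objective: faster
-- what changed: A rescans the whole list on every split (max, then .index, two .insert passes and a .remove); B keeps a priority queue as a list sorted on (-distance, position-key) pairs, pops the front and inserts the two halves at child position keys with bisect.insort, then emits the values in position order, so each split costs O(log) comparisons instead of several full scans; Pre_ only excludes k > 0 with an empty list, where A raises ValueError (and B raises IndexError).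
import Mathlib
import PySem

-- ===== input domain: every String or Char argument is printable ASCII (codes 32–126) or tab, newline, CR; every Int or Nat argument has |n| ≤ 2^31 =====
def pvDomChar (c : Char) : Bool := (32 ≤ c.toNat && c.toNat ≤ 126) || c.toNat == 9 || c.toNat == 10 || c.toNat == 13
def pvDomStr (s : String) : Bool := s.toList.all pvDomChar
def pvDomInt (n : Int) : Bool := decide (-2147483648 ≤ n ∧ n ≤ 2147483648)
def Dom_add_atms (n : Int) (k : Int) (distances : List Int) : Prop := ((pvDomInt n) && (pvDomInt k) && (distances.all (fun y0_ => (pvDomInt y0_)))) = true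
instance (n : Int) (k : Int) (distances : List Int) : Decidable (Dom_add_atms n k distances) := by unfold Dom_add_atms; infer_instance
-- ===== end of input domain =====

-- B replaces A's per-split full scans (max + index + two inserts + remove) by a priority
-- queue kept as a sorted list of (-distance, position-key) pairs: pop the front, insert the
-- two halves at child position keys, and read the result off in position order at the end;
-- objective: faster (fewer comparisons per split).

-- ===== PORT A =====
def add_atms (n : Int) (k : Int) (distances : List Int) : List Int :=
  -- new_distances = []; for distance in distances: new_distances.append(distance)
  let new0 : List Int := distances.foldl (fun acc d => acc ++ [d]) []
  -- for i in range(k): ...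
  (PySem.List.pyRange 0 k 1).foldl (fun nd _ =>
    match PySem.List.max? nd (fun y => y) with
    | none => nd                     -- max([]) raises ValueError: outside Pre_
    | some m =>
      let i : Int := ((PySem.List.index? nd m).getD 0 : Nat)
      let h : Int := PySem.Int.floordiv m 2
      let nd1 := PySem.List.insert nd i h
      let nd2 := PySem.List.insert nd1 (i + 1) h
      (PySem.List.remove? nd2 m).getD nd2) new0

-- ===== PORT B =====
-- Python's '<' on a ((int, tuple-of-ints)) pair, ported by hand (exact): compare the
-- ints, then the tuples; Lean's '<' on List Int is the same lexicographic order as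
-- Python's tuple comparison (a proper prefix is smaller).
def entLt (x y : Int × List Int) : Bool :=
  decide (x.1 < y.1) || (x.1 == y.1 && decide (x.2 < y.2))

-- bisect.insort, ported by hand (exact on the sorted lists maintained here): insert
-- before the first strictly greater element, i.e. after any equal ones.
def insortR (x : Int × List Int) : List (Int × List Int) → List (Int × List Int)
  | [] => [x]
  | y :: t => if entLt x y then x :: y :: t else y :: insortR x t

-- body of Source B's 'for _ in range(k)' loop
def stepB (pq : List (Int × List Int)) : List (Int × List Int) :=
  match pq with
  | [] => []                          -- pq.pop(0) raises IndexError here: outside Pre_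
  | (neg, pos) :: rest =>
      let half := PySem.Int.floordiv (-neg) 2
      insortR (-half, pos ++ [1]) (insortR (-half, pos ++ [0]) rest)

def add_atms_alt (n : Int) (k : Int) (distances : List Int) : List Int :=
  -- pq = []; for i, d in enumerate(distances): insort(pq, (-d, (i,)))
  let pq0 := (PySem.List.enumerate distances).foldl
    (fun pq (p : Int × Int) => insortR (-p.2, [p.1]) pq) []
  -- for _ in range(k): pop front, push the two halves at child position keys
  let pqF := (PySem.List.pyRange 0 k 1).foldl (fun pq _ => stepB pq) pq0
  -- return [-neg for neg, pos in sorted(pq, key=lambda e: e[1])]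
  (PySem.List.sorted pqF (fun e => e.2)).map (fun e => -e.1)

-- ===== PRECONDITION & SPEC =====
-- Pre_ excludes exactly the inputs where Python A raises: k > 0 with an empty list
-- (max([]) raises ValueError; B raises IndexError there too).
def Pre_add_atms (n : Int) (k : Int) (distances : List Int) : Prop :=
  distances ≠ [] ∨ k ≤ 0
instance (n : Int) (k : Int) (distances : List Int) : Decidable (Pre_add_atms n k distances) := by
  unfold Pre_add_atms; infer_instance

def pvWitness_add_atms : Int × Int × List Int := (0, 3, [7, 2, 5])

def Spec_add_atms (n : Int) (k : Int) (distances : List Int) (out : List Int) : Prop := out = add_atms_alt n k distances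
instance (n : Int) (k : Int) (distances : List Int) (out : List Int) : Decidable (Spec_add_atms n k distances out) := by unfold Spec_add_atms; infer_instance

-- ===== CLAIM (what is proved, stated in full; the proofs are below) =====
def Claim_equal_add_atms : Prop := ∀ (n : Int) (k : Int) (distances : List Int), Dom_add_atms n k distances → Pre_add_atms n k distances → Spec_add_atms n k distances (add_atms n k distances)

-- ===== LEMMAS AND PROOFS =====

-- ---- the common abstraction: 'replace the first occurrence of the maximum by its two halves' ----

-- one iteration of A's loop body
def stepA (nd : List Int) : List Int :=
  match PySem.List.max? nd (fun y => y) with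
  | none => nd
  | some m =>
    let i : Int := ((PySem.List.index? nd m).getD 0 : Nat)
    let h : Int := PySem.Int.floordiv m 2
    let nd1 := PySem.List.insert nd i h
    let nd2 := PySem.List.insert nd1 (i + 1) h
    (PySem.List.remove? nd2 m).getD nd2

-- "replace the first occurrence of m by [h, h]"
def rfm (m h : Int) : List Int → List Int
  | [] => []
  | x :: xs => if x = m then h :: h :: xs else x :: rfm m h xs

-- one abstract split step: replace the first maximum by its two halves
def seqStep (xs : List Int) : List Int :=
  match PySem.List.max? xs (fun y => y) with
  | none => xs
  | some m => rfm m (PySem.Int.floordiv m 2) xs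

lemma foldl_const_iterate {α β : Type} (f : α → α) :
    ∀ (l : List β) (x : α), l.foldl (fun s _ => f s) x = f^[l.length] x := by
  intro l
  induction l with
  | nil => intro x; rfl
  | cons b t ih =>
      intro x
      simp [List.foldl, ih, Function.iterate_succ_apply]

lemma remove?_two (pre suf : List Int) (m h : Int) (hp : m ∉ pre) :
    PySem.List.remove? (pre ++ h :: h :: m :: suf) m = some (pre ++ h :: h :: suf) := by
  induction pre with
  | nil =>
      by_cases hh : h = m
      · subst hh; simp [PySem.List.remove?_cons_self]
      · simp [PySem.List.remove?_cons_of_ne _ hh, PySem.List.remove?_cons_self]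
  | cons a pre ih =>
      have ha : a ≠ m := fun h' => hp (by simp [h'])
      have hp' : m ∉ pre := fun h' => hp (by simp [h'])
      simp [PySem.List.remove?_cons_of_ne _ ha, ih hp']

lemma rfm_decomp (pre suf : List Int) (m h : Int) (hp : m ∉ pre) :
    rfm m h (pre ++ m :: suf) = pre ++ h :: h :: suf := by
  induction pre with
  | nil => simp [rfm]
  | cons a pre ih =>
      have ha : a ≠ m := fun h' => hp (by simp [h'])
      have hp' : m ∉ pre := fun h' => hp (by simp [h'])
      simp [rfm, ha, ih hp']

lemma stepA_eq_seqStep (xs : List Int) : stepA xs = seqStep xs := by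
  unfold stepA seqStep
  cases hmax : PySem.List.max? xs (fun y => y) with
  | none => rfl
  | some m =>
      have hmem : m ∈ xs := PySem.List.max?_mem hmax
      have hsome : (PySem.List.index? xs m).isSome := by
        rw [PySem.List.index?_isSome_iff]; exact hmem
      obtain ⟨i, hi⟩ := Option.isSome_iff_exists.mp hsome
      obtain ⟨pre, suf, hxs, hlen, hpre⟩ := (PySem.List.index?_eq_some_iff xs m i).mp hi
      subst hxs
      simp only [hi, Option.getD_some]
      set h := PySem.Int.floordiv m 2 with hh
      have h1 : PySem.List.insert (pre ++ m :: suf) ((i : Nat) : Int) h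
          = pre ++ h :: m :: suf := by
        rw [PySem.List.insert_natCast _ i _ (by simp [← hlen])]
        rw [← hlen]; simp
      rw [h1]
      have h2 : PySem.List.insert (pre ++ h :: m :: suf) (((i : Nat) : Int) + 1) h
          = pre ++ h :: h :: m :: suf := by
        have e1 : pre ++ h :: m :: suf = (pre ++ [h]) ++ m :: suf := by simp
        have e2 : ((i : Nat) : Int) + 1 = (((i + 1 : Nat)) : Int) := by push_cast; ring
        rw [e1, e2, PySem.List.insert_natCast _ (i + 1) _ (by simp [← hlen])]
        have hl : i + 1 = (pre ++ [h]).length := by simp [← hlen]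
        rw [hl, List.take_left, List.drop_left]
        simp
      rw [h2, remove?_two _ _ _ _ hpre, Option.getD_some, rfm_decomp _ _ _ _ hpre]

lemma add_atms_eq_iter (n k : Int) (ds : List Int) :
    add_atms n k ds = seqStep^[k.toNat] ds := by
  unfold add_atms
  rw [PySem.List.foldl_append_singleton]
  show (PySem.List.pyRange 0 k 1).foldl (fun nd _ => stepA nd) ([] ++ ds) = _
  rw [foldl_const_iterate stepA, PySem.List.length_pyRange_one]
  rw [funext stepA_eq_seqStep]
  norm_num

lemma max?_of_bounds (xs : List Int) (v : Int) (hv : v ∈ xs) (hb : ∀ y ∈ xs, y ≤ v) :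
    PySem.List.max? xs (fun y => y) = some v := by
  cases hmax : PySem.List.max? xs (fun y => y) with
  | none =>
      rw [PySem.List.max?_eq_none_iff] at hmax
      subst hmax; simp at hv
  | some w =>
      have hw : w ∈ xs := PySem.List.max?_mem hmax
      exact le_antisymm (hb w hw) (PySem.List.max?_isMax hmax v hv) ▸ rfl

lemma seqStep_nil : seqStep [] = [] := by
  simp [seqStep, PySem.List.max?]

-- ---- order facts about entLt (Python tuple '<') ----

lemma entLt_iff (x y : Int × List Int) :
    entLt x y = true ↔ x.1 < y.1 ∨ (x.1 = y.1 ∧ x.2 < y.2) := by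
  simp [entLt]

lemma entLt_asymm {x y : Int × List Int} (h : entLt x y = true) : entLt y x = false := by
  rw [entLt_iff] at h
  rw [Bool.eq_false_iff]
  intro h'
  rw [entLt_iff] at h'
  rcases h with h | ⟨he, hl⟩ <;> rcases h' with h' | ⟨he', hl'⟩
  · omega
  · omega
  · omega
  · exact absurd (hl.trans hl') (lt_irrefl _)

lemma entLt_trans {x y z : Int × List Int} (h1 : entLt x y = true) (h2 : entLt y z = true) :
    entLt x z = true := by
  rw [entLt_iff] at h1 h2 ⊢
  rcases h1 with h1 | ⟨he1, hl1⟩ <;> rcases h2 with h2 | ⟨he2, hl2⟩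
  · exact Or.inl (h1.trans h2)
  · exact Or.inl (he2 ▸ h1)
  · exact Or.inl (he1 ▸ h2)
  · exact Or.inr ⟨he1.trans he2, hl1.trans hl2⟩

-- ---- lexicographic facts about position keys (List Int; '<' is List.Lex (· < ·)) ----

lemma lex_append_right (a p s : List Int) (h : a < p) (hp : ¬ a <+: p) : a < p ++ s := by
  induction h with
  | nil => exact absurd (List.nil_prefix) hp
  | @rel x xs y ys hxy => exact List.Lex.rel hxy
  | @cons x xs ys _ ih =>
      have hp' : ¬ xs <+: ys := fun hq => hp (List.cons_prefix_cons.mpr ⟨rfl, hq⟩)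
      exact List.Lex.cons (ih hp')

lemma lex_append_left (p r s : List Int) (h : p < r) (hp : ¬ p <+: r) : p ++ s < r := by
  induction h with
  | nil => exact absurd (List.nil_prefix) hp
  | @rel x xs y ys hxy => exact List.Lex.rel hxy
  | @cons x xs ys _ ih =>
      have hp' : ¬ xs <+: ys := fun hq => hp (List.cons_prefix_cons.mpr ⟨rfl, hq⟩)
      exact List.Lex.cons (ih hp')

lemma lex_append_singleton (p : List Int) (x y : Int) (h : x < y) : p ++ [x] < p ++ [y] := by
  induction p with
  | nil => exact List.Lex.rel h
  | cons a p ih => exact List.Lex.cons ih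

-- ---- the invariant ----

def pvVal (e : Int × List Int) : Int := -e.1

-- position keys: strictly increasing and pairwise prefix-incomparable
def KeyRel (a b : Int × List Int) : Prop :=
  a.2 < b.2 ∧ ¬ a.2 <+: b.2 ∧ ¬ b.2 <+: a.2

def PosOK (P : List (Int × List Int)) : Prop := P.Pairwise KeyRel

def SortedPQ (pq : List (Int × List Int)) : Prop :=
  pq.Pairwise (fun a b => entLt b a = false)

def PVInv (pq P : List (Int × List Int)) : Prop := pq.Perm P ∧ SortedPQ pq ∧ PosOK P

-- ---- insortR ----

lemma insortR_perm (x : Int × List Int) (ys : List (Int × List Int)) :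
    (insortR x ys).Perm (x :: ys) := by
  induction ys with
  | nil => simp [insortR]
  | cons y t ih =>
      simp only [insortR]
      split
      · exact List.Perm.refl _
      · exact (ih.cons y).trans (List.Perm.swap x y t)

lemma mem_insortR {z x : Int × List Int} {ys : List (Int × List Int)}
    (h : z ∈ insortR x ys) : z = x ∨ z ∈ ys := by
  have := (insortR_perm x ys).mem_iff.mp h
  simpa using this

lemma insortR_sorted (x : Int × List Int) (ys : List (Int × List Int))
    (h : SortedPQ ys) : SortedPQ (insortR x ys) := by
  induction ys with
  | nil => simp [insortR, SortedPQ]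
  | cons y t ih =>
      simp only [SortedPQ] at h
      rw [List.pairwise_cons] at h
      obtain ⟨hy, ht⟩ := h
      simp only [insortR]
      split
      · next hxy =>
          simp only [SortedPQ]
          rw [List.pairwise_cons]
          refine ⟨?_, List.pairwise_cons.mpr ⟨hy, ht⟩⟩
          intro z hz
          rcases List.mem_cons.mp hz with rfl | hz
          · exact entLt_asymm hxy
          · rw [Bool.eq_false_iff]
            intro hzx
            have := entLt_trans hzx hxy
            rw [hy z hz] at this
            exact Bool.false_ne_true this
      · next hxy =>
          simp only [SortedPQ]
          rw [List.pairwise_cons]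
          refine ⟨?_, ih ht⟩
          intro z hz
          rcases mem_insortR hz with rfl | hz
          · exact Bool.not_eq_true _ ▸ (by simpa using hxy)
          · exact hy z hz

-- ---- the initial state ----

def initEnt (p : Int × Int) : Int × List Int := (-p.2, [p.1])

lemma build_perm (l : List (Int × Int)) :
    ∀ acc, (l.foldl (fun pq p => insortR (initEnt p) pq) acc).Perm (l.map initEnt ++ acc) := by
  induction l with
  | nil => intro acc; simp
  | cons a l ih =>
      intro acc
      have h1 := ih (insortR (initEnt a) acc)
      have h2 : (l.map initEnt ++ insortR (initEnt a) acc).Perm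
          (l.map initEnt ++ initEnt a :: acc) :=
        List.Perm.append_left _ (insortR_perm _ _)
      have h3 : (l.map initEnt ++ initEnt a :: acc).Perm (initEnt a :: (l.map initEnt ++ acc)) :=
        List.perm_middle
      simpa using (h1.trans (h2.trans h3))

lemma build_sorted (l : List (Int × Int)) :
    ∀ acc, SortedPQ acc → SortedPQ (l.foldl (fun pq p => insortR (initEnt p) pq) acc) := by
  induction l with
  | nil => intro acc h; exact h
  | cons a l ih => intro acc h; exact ih _ (insortR_sorted _ _ h)

lemma posOK_init (ds : List Int) : PosOK ((PySem.List.enumerate ds).map initEnt) := by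
  refine List.Pairwise.map initEnt ?_ (PySem.List.pairwise_lt_enumerate ds 0)
  intro a b hab
  refine ⟨List.Lex.rel hab, ?_, ?_⟩
  · rintro ⟨t, ht⟩
    simp only [initEnt, List.singleton_append, List.cons.injEq] at ht
    omega
  · rintro ⟨t, ht⟩
    simp only [initEnt, List.singleton_append, List.cons.injEq] at ht
    omega

lemma init_values (ds : List Int) :
    ((PySem.List.enumerate ds).map initEnt).map pvVal = ds := by
  rw [List.map_map]
  have h : (pvVal ∘ initEnt) = (fun p : Int × Int => p.2) := by
    funext p; simp [pvVal, initEnt]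
  rw [h, PySem.List.map_snd_enumerate]

-- ---- key-structure lemmas for the step ----

lemma keyrel_child_right {a e : Int × List Int} (h : KeyRel a e) (x v : Int) :
    KeyRel a (v, e.2 ++ [x]) := by
  obtain ⟨hlt, hp1, hp2⟩ := h
  refine ⟨lex_append_right _ _ _ hlt hp1, ?_, ?_⟩
  · intro hp
    rcases List.prefix_or_prefix_of_prefix hp (List.prefix_append e.2 [x]) with h' | h'
    · exact hp1 h'
    · exact hp2 h'
  · intro hp
    exact hp2 ((List.prefix_append e.2 [x]).trans hp)

lemma keyrel_child_left {e b : Int × List Int} (h : KeyRel e b) (x v : Int) :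
    KeyRel (v, e.2 ++ [x]) b := by
  obtain ⟨hlt, hp1, hp2⟩ := h
  refine ⟨lex_append_left _ _ _ hlt hp1, ?_, ?_⟩
  · intro hp
    exact hp1 ((List.prefix_append e.2 [x]).trans hp)
  · intro hp
    rcases List.prefix_or_prefix_of_prefix hp (List.prefix_append e.2 [x]) with h' | h'
    · exact hp2 h'
    · exact hp1 h'

lemma keyrel_children (p : List Int) (v w : Int) : KeyRel (v, p ++ [0]) (w, p ++ [1]) := by
  refine ⟨lex_append_singleton p 0 1 (by norm_num), ?_, ?_⟩
  · intro hp
    have h1 := List.IsPrefix.eq_of_length hp (by simp)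
    have h2 := List.append_cancel_left h1
    simp at h2
  · intro hp
    have h1 := List.IsPrefix.eq_of_length hp (by simp)
    have h2 := List.append_cancel_left h1
    simp at h2

-- ---- the simulation step ----

lemma step_sim (pq P : List (Int × List Int)) (h : PVInv pq P) :
    ∃ P', PVInv (stepB pq) P' ∧ P'.map pvVal = seqStep (P.map pvVal) := by
  obtain ⟨hperm, hsorted, hpos⟩ := h
  cases pq with
  | nil =>
      have hP : P = [] := List.perm_nil.mp hperm.symm
      subst hP
      exact ⟨[], ⟨List.Perm.refl _, List.Pairwise.nil, List.Pairwise.nil⟩, by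
        simp [seqStep_nil]⟩
  | cons e rest =>
      obtain ⟨neg, pos⟩ := e
      set e : Int × List Int := (neg, pos) with he
      have heP : e ∈ P := hperm.subset (List.mem_cons_self)
      obtain ⟨L, R, hLR⟩ := List.mem_iff_append.mp heP
      subst hLR
      obtain ⟨pwL, pwER, hcross⟩ := List.pairwise_append.mp hpos
      obtain ⟨heR, pwR⟩ := List.pairwise_cons.mp pwER
      obtain ⟨hminrest, hsortedrest⟩ := List.pairwise_cons.mp hsorted
      have hrest_perm : rest.Perm (L ++ R) :=
        ((List.perm_middle).symm.trans hperm.symm).symm.cons_inv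
      have hLe : ∀ a ∈ L, KeyRel a e := fun a ha => hcross a ha e List.mem_cons_self
      have haL_lt : ∀ a ∈ L, pvVal a < pvVal e := by
        intro a ha
        have hke := hLe a ha
        have hane : a ≠ e := by
          intro hae; exact absurd (hae ▸ hke.1) (lt_irrefl _)
        have harest : a ∈ rest := by
          have : a ∈ L ++ R := List.mem_append.mpr (Or.inl ha)
          exact hrest_perm.mem_iff.mpr this
        have hfe := hminrest a harest
        rw [Bool.eq_false_iff, Ne, entLt_iff] at hfe
        push_neg at hfe
        have h1 : e.1 ≤ a.1 := hfe.1
        have hk2 : a.2 < e.2 := hke.1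
        have h3 : a.1 ≠ e.1 := fun hh => absurd hk2 (not_lt.mpr (hfe.2 hh))
        simp only [pvVal]
        omega
      have hall_le : ∀ f ∈ L ++ e :: R, pvVal f ≤ pvVal e := by
        intro f hf
        have : f ∈ e :: rest := hperm.mem_iff.mpr hf
        rcases List.mem_cons.mp this with rfl | hfr
        · exact le_refl _
        · have hfe := hminrest f hfr
          rw [Bool.eq_false_iff, Ne, entLt_iff] at hfe
          push_neg at hfe
          simp only [pvVal]
          have := hfe.1
          omega
      have hmax : PySem.List.max? ((L ++ e :: R).map pvVal) (fun y => y) = some (pvVal e) := by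
        apply max?_of_bounds
        · exact List.mem_map_of_mem (by simp)
        · intro y hy
          obtain ⟨f, hf, rfl⟩ := List.mem_map.mp hy
          exact hall_le f hf
      set h2 : Int := PySem.Int.floordiv (pvVal e) 2 with hh2
      have hseq : seqStep ((L ++ e :: R).map pvVal)
          = L.map pvVal ++ h2 :: h2 :: R.map pvVal := by
        simp only [seqStep, hmax]
        have hmap : (L ++ e :: R).map pvVal = L.map pvVal ++ pvVal e :: R.map pvVal := by
          simp
        rw [hmap, rfm_decomp]
        intro hmem
        obtain ⟨a, ha, hv⟩ := List.mem_map.mp hmem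
        exact absurd hv (ne_of_lt (haL_lt a ha))
      -- the two children
      set c0 : Int × List Int := (-h2, pos ++ [0]) with hc0
      set c1 : Int × List Int := (-h2, pos ++ [1]) with hc1
      have hstep : stepB (e :: rest) = insortR c1 (insortR c0 rest) := by
        simp only [stepB, he, hc0, hc1, hh2, pvVal]
      refine ⟨L ++ c0 :: c1 :: R, ⟨?_, ?_, ?_⟩, ?_⟩
      · -- permutation
        rw [hstep]
        have p1 : (insortR c1 (insortR c0 rest)).Perm (c1 :: insortR c0 rest) :=
          insortR_perm _ _
        have p2 : (c1 :: insortR c0 rest).Perm (c1 :: c0 :: rest) :=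
          (insortR_perm _ _).cons c1
        have p3 : (c1 :: c0 :: rest).Perm (c0 :: c1 :: rest) := List.Perm.swap _ _ _
        have p4 : (c0 :: c1 :: rest).Perm (c0 :: c1 :: (L ++ R)) :=
          (hrest_perm.cons c1).cons c0
        have p5 : (L ++ c0 :: c1 :: R).Perm (c0 :: c1 :: (L ++ R)) := by
          have q1 : (L ++ c0 :: c1 :: R).Perm (c0 :: (L ++ c1 :: R)) := List.perm_middle
          have q2 : (L ++ c1 :: R).Perm (c1 :: (L ++ R)) := List.perm_middle
          exact q1.trans ((q2.cons c0))
        exact ((p1.trans (p2.trans (p3.trans p4)))).trans p5.symm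
      · -- sortedness of the new queue
        rw [hstep]
        exact insortR_sorted _ _ (insortR_sorted _ _ hsortedrest)
      · -- PosOK of the new position list
        rw [PosOK, List.pairwise_append]
        refine ⟨pwL, ?_, ?_⟩
        · rw [List.pairwise_cons]
          constructor
          · intro b hb
            rcases List.mem_cons.mp hb with rfl | hbR
            · exact keyrel_children pos _ _
            · exact keyrel_child_left (heR b hbR) 0 _
          · rw [List.pairwise_cons]
            exact ⟨fun b hb => keyrel_child_left (heR b hb) 1 _, pwR⟩
        · intro a ha b hb
          rcases List.mem_cons.mp hb with rfl | hb'
          · exact keyrel_child_right (hLe a ha) 0 _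
          · rcases List.mem_cons.mp hb' with rfl | hbR
            · exact keyrel_child_right (hLe a ha) 1 _
            · exact hcross a ha b (List.mem_cons_of_mem e hbR)
      · -- the values
        rw [hseq]
        simp [pvVal, hc0, hc1]

-- ---- iterating the step ----

lemma iter_sim (t : Nat) : ∀ pq P, PVInv pq P →
    ∃ P', PVInv (stepB^[t] pq) P' ∧ P'.map pvVal = seqStep^[t] (P.map pvVal) := by
  induction t with
  | zero => intro pq P h; exact ⟨P, h, rfl⟩
  | succ t ih =>
      intro pq P h
      obtain ⟨P1, h1, hv1⟩ := step_sim pq P h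
      obtain ⟨P', h', hv'⟩ := ih (stepB pq) P1 h1
      refine ⟨P', by rwa [Function.iterate_succ_apply], ?_⟩
      rw [Function.iterate_succ_apply, hv', hv1]

-- ---- B's port equals the abstract iteration ----

lemma add_atms_alt_eq_iter (n k : Int) (ds : List Int) :
    add_atms_alt n k ds = seqStep^[k.toNat] ds := by
  change (PySem.List.sorted ((PySem.List.pyRange 0 k 1).foldl (fun pq _ => stepB pq)
      ((PySem.List.enumerate ds).foldl (fun pq p => insortR (initEnt p) pq) []))
      (fun e => e.2)).map (fun e => -e.1) = seqStep^[k.toNat] ds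
  set P0 : List (Int × List Int) := (PySem.List.enumerate ds).map initEnt with hP0
  have hperm0 : ((PySem.List.enumerate ds).foldl (fun pq p => insortR (initEnt p) pq) []).Perm P0 := by
    have := build_perm (PySem.List.enumerate ds) []
    simpa using this
  have hsorted0 : SortedPQ ((PySem.List.enumerate ds).foldl (fun pq p => insortR (initEnt p) pq) []) :=
    build_sorted _ [] List.Pairwise.nil
  have hloop : (PySem.List.pyRange 0 k 1).foldl (fun pq _ => stepB pq)
      ((PySem.List.enumerate ds).foldl (fun pq p => insortR (initEnt p) pq) [])
      = stepB^[k.toNat] ((PySem.List.enumerate ds).foldl (fun pq p => insortR (initEnt p) pq) []) := by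
    rw [foldl_const_iterate stepB, PySem.List.length_pyRange_one]
    norm_num
  rw [hloop]
  obtain ⟨P', hInv2, hv'⟩ := iter_sim k.toNat _ P0 ⟨hperm0, hsorted0, posOK_init ds⟩
  obtain ⟨hperm', hsorted', hpos'⟩ := hInv2
  have hs : PySem.List.sorted (stepB^[k.toNat]
      ((PySem.List.enumerate ds).foldl (fun pq p => insortR (initEnt p) pq) []))
      (fun e => e.2) = P' := by
    have h0 := PySem.List.sorted_eq_of_perm_of_pairwise_lt _ P' (fun e : Int × List Int => e.2)
      hperm'.symm (hpos'.imp (fun h => h.1))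
    convert h0 using 2
  rw [hs]
  have : P'.map (fun e => -e.1) = P'.map pvVal := rfl
  rw [this, hv', init_values]

-- ===== VERDICT (by name: the statement is the Claim_ definition above) =====
theorem add_atms_spec : Claim_equal_add_atms := by
  intro n k ds _ _
  unfold Spec_add_atms
  rw [add_atms_eq_iter, add_atms_alt_eq_iter]
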